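-- pv_equiv track=rewrite | github.com/LucasMacielFer/codificacao_linha | logica.py | codificar_mlt3
-- ===== SOURCE A (Python) =====
-- def codificar_mlt3(binario_str):
--     niveis = []
--     nivel_atual = 0
--     ultimo_nivel_nao_zero = -1
--     for bit in binario_str:
--         if bit == '1':
--             if nivel_atual == 0:
--                 nivel_atual = -ultimo_nivel_nao_zero
--                 ultimo_nivel_nao_zero = nivel_atual
--             else:
--                 nivel_atual = 0
--         niveis.append(nivel_atual)
--     return niveis
-- ===== SOURCE B (Python) =====
-- def codificar_mlt3(binario_str):
--     NIVEIS = [0, 1, 0, -1]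
--     fase = 0
--     saida = []
--     for bit in binario_str:
--         fase = (fase + (bit == '1')) % 4
--         saida.append(NIVEIS[fase])
--     return saida
-- ===== Notes on version B (the rewrite author's own statement) =====
-- stated objective: idiomatic
-- what changed: Replaces A's two-variable sign-flipping state machine (current level + last non-zero level) with a single cyclic phase counter modulo 4 and a fixed lookup table [0, 1, 0, -1]; the branch on the bit disappears into arithmetic.
import Mathlib
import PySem

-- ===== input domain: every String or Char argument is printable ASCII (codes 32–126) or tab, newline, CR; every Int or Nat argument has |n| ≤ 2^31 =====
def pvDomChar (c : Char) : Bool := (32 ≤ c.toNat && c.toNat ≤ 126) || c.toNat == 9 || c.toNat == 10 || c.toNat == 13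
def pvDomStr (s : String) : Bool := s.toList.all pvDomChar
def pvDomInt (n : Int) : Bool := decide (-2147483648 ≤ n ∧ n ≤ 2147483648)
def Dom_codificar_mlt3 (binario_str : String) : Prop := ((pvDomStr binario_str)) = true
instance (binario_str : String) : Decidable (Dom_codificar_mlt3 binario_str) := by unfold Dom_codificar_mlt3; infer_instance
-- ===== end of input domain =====

-- B replaces A's two-variable sign-flipping state with a phase counter mod 4 and a level table (idiomatic; same cost).
-- ===== PORT A =====
def mlt3StepA (st : List Int × Int × Int) (bit : Char) : List Int × Int × Int :=
  if bit = '1' then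
    if st.2.1 = 0 then
      let n := -st.2.2
      (st.1 ++ [n], n, n)
    else (st.1 ++ [(0 : Int)], 0, st.2.2)
  else (st.1 ++ [st.2.1], st.2.1, st.2.2)

def codificar_mlt3 (binario_str : String) : List Int :=
  (binario_str.toList.foldl mlt3StepA ([], 0, -1)).1

-- ===== PORT B =====
-- NIVEIS[fase] with fase = (… % 4) ∈ [0,4) never raises in Python; the .getD 0 default is unreachable.
def mlt3Niveis : List Int := [0, 1, 0, -1]

def mlt3StepB (st : List Int × Int) (bit : Char) : List Int × Int :=
  let fase := PySem.Int.mod (st.2 + (if bit = '1' then 1 else 0)) 4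
  (st.1 ++ [(PySem.List.pyGet? mlt3Niveis fase).getD 0], fase)

def codificar_mlt3_alt (binario_str : String) : List Int :=
  (binario_str.toList.foldl mlt3StepB ([], 0)).1

-- ===== PRECONDITION & SPEC =====
def Spec_codificar_mlt3 (binario_str : String) (out : List Int) : Prop := out = codificar_mlt3_alt binario_str
instance (binario_str : String) (out : List Int) : Decidable (Spec_codificar_mlt3 binario_str out) := by unfold Spec_codificar_mlt3; infer_instance

-- ===== CLAIM (what is proved, stated in full; the proofs are below) =====
def Claim_equal_codificar_mlt3 : Prop := ∀ (binario_str : String), Dom_codificar_mlt3 binario_str → Spec_codificar_mlt3 binario_str (codificar_mlt3 binario_str)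

-- ===== LEMMAS AND PROOFS =====

-- ===== VERDICT (by name: the statement is the Claim_ definition above) =====
-- A's (nivel_atual, ultimo_nivel_nao_zero) state as a function of B's phase
def mlt3Phase (f : Int) : Int × Int :=
  if f = 0 then (0, -1) else if f = 1 then (1, 1) else if f = 2 then (0, 1) else (-1, -1)

theorem mlt3_main (l : List Char) : ∀ (acc : List Int) (f : Int),
    (f = 0 ∨ f = 1 ∨ f = 2 ∨ f = 3) →
    (List.foldl mlt3StepA (acc, mlt3Phase f) l).1 = (List.foldl mlt3StepB (acc, f) l).1 := by
  induction l with
  | nil => intro acc f _; rfl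
  | cons bit l ih =>
    intro acc f hf
    have e0 : (PySem.List.pyGet? mlt3Niveis 0).getD 0 = (0 : Int) := by decide
    have e1 : (PySem.List.pyGet? mlt3Niveis 1).getD 0 = (1 : Int) := by decide
    have e2 : (PySem.List.pyGet? mlt3Niveis 2).getD 0 = (0 : Int) := by decide
    have e3 : (PySem.List.pyGet? mlt3Niveis 3).getD 0 = (-1 : Int) := by decide
    by_cases hb : bit = '1' <;> rcases hf with h | h | h | h <;> subst h <;>
      simp only [List.foldl_cons, mlt3StepA, mlt3StepB, mlt3Phase, hb] <;>
      norm_num [PySem.Int.mod, e0, e1, e2, e3] <;>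
      first
        | simpa [mlt3Phase] using ih _ 0 (by norm_num)
        | simpa [mlt3Phase] using ih _ 1 (by norm_num)
        | simpa [mlt3Phase] using ih _ 2 (by norm_num)
        | simpa [mlt3Phase] using ih _ 3 (by norm_num)

theorem codificar_mlt3_spec : Claim_equal_codificar_mlt3 := by
  intro s _
  unfold Spec_codificar_mlt3 codificar_mlt3 codificar_mlt3_alt
  exact mlt3_main s.toList [] 0 (Or.inl rfl)
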